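-- pv_equiv track=rewrite | github.com/yasinaydin14/Pokemon-Bot | pokechamp/pokechamp/translate.py | get_player_team
-- ===== SOURCE A (Python) =====
-- def get_player_team(battle_turns_text, player_id):
--     """Reverse engineer player team from battle log."""
--     team_player, team_mons = [], []
--     for turn in battle_turns_text:
--         for m in [msg.replace('\n','').split("|") for msg in turn]:
--             if len(m) >= 4 and 'switch' in m[1] and f'{player_id}a' in m[2]:
--                 mon = m[3]
--                 if mon not in team_mons:
--                     team_mons.append(mon)
--                     team_player.append(f'|poke|{player_id}|{mon}')
--     return team_player, team_mons
-- ===== SOURCE B (Python) =====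
-- def get_player_team(battle_turns_text, player_id):
--     """Reverse engineer player team from battle log."""
--     tag = player_id + 'a'
--     # phase 1: collect every matching mon, duplicates and all
--     mons = []
--     for turn in battle_turns_text:
--         for msg in turn:
--             m = msg.replace('\n', '').split('|')
--             if len(m) >= 4 and 'switch' in m[1] and tag in m[2]:
--                 mons.append(m[3])
--     # phase 2: first-occurrence nub by repeatedly filtering the remainder
--     # (no 'seen' structure or membership test: take the head, drop its copies)
--     team_mons = []
--     rest = mons
--     while rest:
--         head = rest[0]
--         team_mons.append(head)
--         rest = [x for x in rest[1:] if x != head]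
--     # phase 3: derive the |poke| lines
--     team_player = ['|poke|%s|%s' % (player_id, mon) for mon in team_mons]
--     return team_player, team_mons
-- ===== Notes on version B (the rewrite author's own statement) =====
-- stated objective: alternative
-- what changed: Replaces A's single interleaved pass that grows two parallel lists under an inline 'mon not in team_mons' membership guard by three phases: collect all matching mons with duplicates, then a filter-nub loop that keeps no 'seen' structure at all (take the head, filter its copies out of the remainder), then derive the |poke| lines from the deduped list.
import Mathlib
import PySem

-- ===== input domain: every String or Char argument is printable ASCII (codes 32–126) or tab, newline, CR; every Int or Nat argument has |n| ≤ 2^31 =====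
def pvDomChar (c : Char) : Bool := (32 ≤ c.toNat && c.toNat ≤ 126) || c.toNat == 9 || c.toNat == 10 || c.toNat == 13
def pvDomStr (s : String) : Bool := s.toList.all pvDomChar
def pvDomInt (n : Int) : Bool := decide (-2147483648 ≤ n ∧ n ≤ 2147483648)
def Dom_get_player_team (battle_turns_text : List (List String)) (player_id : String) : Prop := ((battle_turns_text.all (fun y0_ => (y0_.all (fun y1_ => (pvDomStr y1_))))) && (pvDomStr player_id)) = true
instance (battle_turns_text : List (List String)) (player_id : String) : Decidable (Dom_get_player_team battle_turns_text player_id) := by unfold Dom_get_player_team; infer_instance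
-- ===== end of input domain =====

-- B replaces A's interleaved pass (two parallel lists grown under an inline membership guard)
-- by three phases: collect all matching mons with duplicates, a filter-nub loop that keeps no
-- seen-structure (take the head, filter its copies from the remainder), then derive the lines.


-- ===== PORT A =====
-- msg.replace('\n','').split('|'); split? is none only for an empty separator, "|" ≠ ""
def pvParse (msg : String) : List String :=
  (PySem.Str.split? (PySem.Str.replace msg "\n" "") "|").getD []

-- f'|poke|{player_id}|{mon}' (and B's '|poke|%s|%s' % (player_id, mon))
def pvFmt (player_id mon : String) : String :=
  PySem.Str.join "" ["|poke|", player_id, "|", mon]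

def get_player_team (battle_turns_text : List (List String)) (player_id : String) : List String × List String :=
  battle_turns_text.foldl (fun st turn =>
    (turn.map pvParse).foldl (fun st m =>
      if decide (4 ≤ m.length) && PySem.Str.isIn "switch" (m.getD 1 "")
          && PySem.Str.isIn (PySem.Str.join "" [player_id, "a"]) (m.getD 2 "") then
        let mon := m.getD 3 ""
        if st.2.contains mon then st
        else (st.1 ++ [pvFmt player_id mon], st.2 ++ [mon])
      else st) st) ([], [])

-- ===== PORT B =====
-- B's while-loop: append the head, recurse on the remainder with the head's copies filtered out
def pvNubLoop (acc : List String) (rest : List String) : List String :=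
  match rest with
  | [] => acc
  | head :: t => pvNubLoop (acc ++ [head]) (t.filter (fun x => x != head))
termination_by rest.length
decreasing_by
  simpa using List.length_filter_le (fun x => x != head) t

def get_player_team_alt (battle_turns_text : List (List String)) (player_id : String) : List String × List String :=
  let tag := PySem.Str.join "" [player_id, "a"]
  -- phase 1: collect every matching mon, duplicates and all
  let mons := battle_turns_text.foldl (fun acc turn =>
    turn.foldl (fun acc msg =>
      let m := pvParse msg
      if decide (4 ≤ m.length) && PySem.Str.isIn "switch" (m.getD 1 "")
          && PySem.Str.isIn tag (m.getD 2 "") then acc ++ [m.getD 3 ""]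
      else acc) acc) []
  -- phase 2: first-occurrence nub by repeated filtering
  let team_mons := pvNubLoop [] mons
  -- phase 3: derive the |poke| lines
  let team_player := team_mons.map (fun mon => pvFmt player_id mon)
  (team_player, team_mons)

-- ===== PRECONDITION & SPEC =====
def Spec_get_player_team (battle_turns_text : List (List String)) (player_id : String) (out : List String × List String) : Prop := out = get_player_team_alt battle_turns_text player_id
instance (battle_turns_text : List (List String)) (player_id : String) (out : List String × List String) : Decidable (Spec_get_player_team battle_turns_text player_id out) := by unfold Spec_get_player_team; infer_instance

-- ===== CLAIM (what is proved, stated in full; the proofs are below) =====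
def Claim_equal_get_player_team : Prop := ∀ (battle_turns_text : List (List String)) (player_id : String), Dom_get_player_team battle_turns_text player_id → Spec_get_player_team battle_turns_text player_id (get_player_team battle_turns_text player_id)

-- ===== LEMMAS AND PROOFS =====

-- the match condition shared by both programs' source texts
def pvCond (player_id : String) (m : List String) : Bool :=
  decide (4 ≤ m.length) && PySem.Str.isIn "switch" (m.getD 1 "")
    && PySem.Str.isIn (PySem.Str.join "" [player_id, "a"]) (m.getD 2 "")

-- A's inner loop body, as one step over a parsed message
def pvStep (player_id : String) (st : List String × List String) (m : List String) : List String × List String :=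
  if pvCond player_id m then
    let mon := m.getD 3 ""
    if st.2.contains mon then st
    else (st.1 ++ [pvFmt player_id mon], st.2 ++ [mon])
  else st

-- invariant of A's loop: the state is (T.map fmt, T) and T evolves by Set.add on the selected mons
theorem pvStep_invariant (player_id : String) (ms : List (List String)) :
    ∀ t : List String,
      ms.foldl (pvStep player_id) (t.map (pvFmt player_id), t) =
        (((ms.filter (pvCond player_id)).map (fun m => m.getD 3 "")).foldl PySem.Set.add t
            |>.map (pvFmt player_id),
         ((ms.filter (pvCond player_id)).map (fun m => m.getD 3 "")).foldl PySem.Set.add t) := by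
  induction ms with
  | nil => intro t; simp
  | cons m ms ih =>
    intro t
    by_cases hc : pvCond player_id m
    · have hstep : pvStep player_id (t.map (pvFmt player_id), t) m =
          ((PySem.Set.add t (m.getD 3 "")).map (pvFmt player_id), PySem.Set.add t (m.getD 3 "")) := by
        simp only [pvStep, hc, if_pos, PySem.Set.add]
        split_ifs <;> simp_all
      simp only [List.foldl_cons, List.filter_cons_of_pos hc, List.map_cons, hstep]
      exact ih (PySem.Set.add t (m.getD 3 ""))
    · simp only [List.foldl_cons, List.filter_cons_of_neg hc, pvStep, hc, if_neg, Bool.false_eq_true,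
        not_false_iff]
      exact ih t

-- A's seen-set fold equals B's filter-nub loop started from the same accumulator
theorem pvFold_eq_nubLoop (xs : List String) :
    ∀ t : List String,
      xs.foldl PySem.Set.add t = pvNubLoop t (xs.filter (fun x => !t.contains x)) := by
  induction xs with
  | nil => intro t; rw [pvNubLoop.eq_def]; simp
  | cons x xs ih =>
    intro t
    by_cases hx : t.contains x
    · have hset : PySem.Set.add t x = t := by
        have hm : x ∈ t := by simpa using hx
        simp [PySem.Set.add, PySem.Set.contains, hm]
      simp only [List.foldl_cons, List.filter_cons, hx, Bool.not_true, hset]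
      simpa using ih t
    · have hset : PySem.Set.add t x = t ++ [x] := by
        have hm : x ∉ t := by simpa using hx
        simp [PySem.Set.add, PySem.Set.contains, hm]
      simp only [List.foldl_cons, List.filter_cons, hx, Bool.not_false, hset]
      simp only [if_pos trivial]
      rw [pvNubLoop.eq_def, ih (t ++ [x])]
      congr 1
      rw [List.filter_filter]
      apply List.filter_congr
      intro y _
      by_cases h1 : y = x
      · subst h1; simp
      · simp [h1]

-- ===== VERDICT (by name: the statement is the Claim_ definition above) =====
theorem get_player_team_spec : Claim_equal_get_player_team := by
  intro bt pid _
  show get_player_team bt pid = get_player_team_alt bt pid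
  have hA : get_player_team bt pid =
      (bt.flatten.map pvParse).foldl (pvStep pid) (([] : List String), ([] : List String)) := by
    rw [List.map_flatten, List.foldl_flatten, List.foldl_map]
    rfl
  have hB : get_player_team_alt bt pid =
      ((pvNubLoop [] (bt.foldl (fun acc turn =>
          turn.foldl (fun (acc : List String) msg =>
            if pvCond pid (pvParse msg) then acc ++ [(pvParse msg).getD 3 ""] else acc) acc) [])).map
          (fun mon => pvFmt pid mon),
        pvNubLoop [] (bt.foldl (fun acc turn =>
          turn.foldl (fun (acc : List String) msg =>
            if pvCond pid (pvParse msg) then acc ++ [(pvParse msg).getD 3 ""] else acc) acc) [])) := rfl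
  have hmons : (bt.foldl (fun acc turn =>
      turn.foldl (fun (acc : List String) msg =>
        if pvCond pid (pvParse msg) then acc ++ [(pvParse msg).getD 3 ""] else acc) acc) []) =
      ((bt.flatten.map pvParse).filter (pvCond pid)).map (fun m => m.getD 3 "") := by
    rw [← List.foldl_flatten, PySem.List.foldl_append_if]
    simp [List.filter_map, List.map_map, Function.comp_def]
  rw [hA, hB, hmons]
  have h := pvStep_invariant pid (bt.flatten.map pvParse) []
  simp only [List.map_nil] at h
  rw [h, pvFold_eq_nubLoop]
  have hfil : (List.filter (fun x => !(([] : List String).contains x))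
      (((bt.flatten.map pvParse).filter (pvCond pid)).map (fun m => m.getD 3 ""))) =
      ((bt.flatten.map pvParse).filter (pvCond pid)).map (fun m => m.getD 3 "") := by
    simp only [List.contains_nil, Bool.not_false, List.filter_true]
  rw [hfil]
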